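-- pv_equiv track=rewrite | github.com/sheryllan/tickdb | bar_checks/htmlprocessor.py | target_insert_pos
-- ===== SOURCE A (Python) =====
-- from itertools import groupby
--
-- def target_insert_pos(el_dict, parent):
--     parent[:] = []
--     i = 0
--     for is_target, el_group in groupby(el_dict, lambda x: el_dict[x] is True):
--         if is_target:
--             for el in el_group:
--                 yield el, i
--         else:
--             el_group = list(el_group)
--             parent[:] = list(parent) + el_group
--             i += len(el_group)
-- ===== SOURCE B (Python) =====
-- def target_insert_pos(el_dict, parent):
--     parent[:] = []
--     i = 0
--     for el in el_dict:
--         if el_dict[el] is True: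
--             yield el, i
--         else:
--             parent.append(el)
--             i += 1
-- ===== Notes on version B (the rewrite author's own statement) =====
-- stated objective: simpler
-- what changed: Replaces the itertools.groupby run-partitioning (per-run inner yield loop, list() materialisation, len() counting and the per-run rebuild parent[:] = list(parent) + el_group) by one flat per-element loop that yields targets at the current offset and otherwise appends to parent and increments the offset by 1.
import Mathlib
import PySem

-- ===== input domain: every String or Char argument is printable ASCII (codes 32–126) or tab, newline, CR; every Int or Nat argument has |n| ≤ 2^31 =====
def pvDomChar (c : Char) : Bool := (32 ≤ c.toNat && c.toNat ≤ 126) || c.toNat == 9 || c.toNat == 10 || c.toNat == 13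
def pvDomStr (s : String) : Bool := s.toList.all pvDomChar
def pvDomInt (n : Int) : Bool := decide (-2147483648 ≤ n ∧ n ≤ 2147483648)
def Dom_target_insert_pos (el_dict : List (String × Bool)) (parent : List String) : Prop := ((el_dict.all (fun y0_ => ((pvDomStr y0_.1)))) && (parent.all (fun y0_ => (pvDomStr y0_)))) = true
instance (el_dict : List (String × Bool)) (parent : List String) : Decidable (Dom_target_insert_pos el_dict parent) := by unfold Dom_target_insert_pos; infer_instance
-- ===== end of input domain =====

-- B replaces A's groupby run-partitioning by one flat per-element loop (objective: simpler).
-- Both Pythons mutate `parent` in place identically; the theorems here are about the yielded sequence.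


-- ===== PORT A =====
-- itertools.groupby: split a list into maximal adjacent runs sharing the key f
def pvGroupby (f : String → Bool) : List String → List (Bool × List String)
  | [] => []
  | x :: xs =>
    match pvGroupby f xs with
    | [] => [(f x, [x])]
    | (b, g) :: rest => if f x = b then (b, x :: g) :: rest else (f x, [x]) :: (b, g) :: rest

-- state: (yielded pairs so far, parent, i)
def target_insert_pos (el_dict : List (String × Bool)) (parent : List String) : List (String × Int) :=
  let d := PySem.Dict.ofList el_dict
  -- parent[:] = []; then the run loop over groupby(el_dict, lambda x: el_dict[x] is True)
  ((pvGroupby (fun x => d.getD x false) (d.keys)).foldl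
    (fun (st : List (String × Int) × List String × Int) grp =>
      if grp.1 then
        (st.1 ++ grp.2.map (fun el => (el, st.2.2)), st.2.1, st.2.2)
      else
        (st.1, st.2.1 ++ grp.2, st.2.2 + (grp.2.length : Int)))
    ([], [], 0)).1

-- ===== PORT B =====
def target_insert_pos_alt (el_dict : List (String × Bool)) (parent : List String) : List (String × Int) :=
  let d := PySem.Dict.ofList el_dict
  ((d.keys).foldl
    (fun (st : List (String × Int) × Int) el =>
      if d.getD el false then (st.1 ++ [(el, st.2)], st.2)
      else (st.1, st.2 + 1))
    ([], 0)).1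

-- ===== PRECONDITION & SPEC =====
def Spec_target_insert_pos (el_dict : List (String × Bool)) (parent : List String) (out : List (String × Int)) : Prop := out = target_insert_pos_alt el_dict parent
instance (el_dict : List (String × Bool)) (parent : List String) (out : List (String × Int)) : Decidable (Spec_target_insert_pos el_dict parent out) := by unfold Spec_target_insert_pos; infer_instance

-- ===== CLAIM (what is proved, stated in full; the proofs are below) =====
def Claim_equal_target_insert_pos : Prop := ∀ (el_dict : List (String × Bool)) (parent : List String), Dom_target_insert_pos el_dict parent → Spec_target_insert_pos el_dict parent (target_insert_pos el_dict parent)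

-- ===== LEMMAS AND PROOFS =====

-- B's per-element step, abstracted over the key predicate
def pvStepB (f : String → Bool) (st : List (String × Int) × Int) (el : String) : List (String × Int) × Int :=
  if f el then (st.1 ++ [(el, st.2)], st.2) else (st.1, st.2 + 1)

-- every element of a pvGroupby run has the run's key
theorem pvGroupby_sound (f : String → Bool) (xs : List String) :
    ∀ p ∈ pvGroupby f xs, ∀ el ∈ p.2, f el = p.1 := by
  induction xs with
  | nil => simp [pvGroupby]
  | cons x xs ih =>
    intro p hp el hel
    simp only [pvGroupby] at hp
    cases hG : pvGroupby f xs with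
    | nil =>
      rw [hG] at hp; simp at hp
      subst hp; simp at hel; subst hel; rfl
    | cons q rest =>
      obtain ⟨b, g⟩ := q
      rw [hG] at hp
      by_cases hfx : f x = b
      · simp [hfx] at hp
        rcases hp with hp | hp
        · subst hp; simp at hel
          rcases hel with hel | hel
          · subst hel; exact hfx
          · exact ih (b, g) (by rw [hG]; exact List.mem_cons_self) el hel
        · exact ih p (by rw [hG]; exact List.mem_cons_of_mem _ hp) el hel
      · simp [hfx] at hp
        rcases hp with hp | hp
        · subst hp; simp at hel; subst hel; rfl
        · rcases hp with hp | hp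
          · subst hp; exact ih (b, g) (by rw [hG]; exact List.mem_cons_self) el hel
          · exact ih p (by rw [hG]; exact List.mem_cons_of_mem _ hp) el hel

-- the runs flatten back to the original list
theorem pvGroupby_flatten (f : String → Bool) (xs : List String) :
    (pvGroupby f xs).flatMap Prod.snd = xs := by
  induction xs with
  | nil => simp [pvGroupby]
  | cons x xs ih =>
    simp only [pvGroupby]
    cases hG : pvGroupby f xs with
    | nil => rw [hG] at ih; simp at ih; simp [ih]
    | cons q rest =>
      obtain ⟨b, g⟩ := q
      rw [hG] at ih
      by_cases hfx : f x = b
      · simp [hfx]; simpa using ih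
      · simp [hfx]; simpa using ih

-- a true-run processed at once equals the flat fold over its elements
theorem pvStepB_true_run (f : String → Bool) (g : List String)
    (hg : ∀ el ∈ g, f el = true) (out : List (String × Int)) (i : Int) :
    g.foldl (pvStepB f) (out, i) = (out ++ g.map (fun el => (el, i)), i) := by
  induction g generalizing out with
  | nil => simp
  | cons x g ih =>
    have hx : f x = true := hg x List.mem_cons_self
    simp only [List.foldl_cons, pvStepB, hx, if_true]
    rw [ih (fun el hel => hg el (List.mem_cons_of_mem _ hel))]
    simp

-- a false-run processed at once equals the flat fold over its elements
theorem pvStepB_false_run (f : String → Bool) (g : List String)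
    (hg : ∀ el ∈ g, f el = false) (out : List (String × Int)) (i : Int) :
    g.foldl (pvStepB f) (out, i) = (out, i + (g.length : Int)) := by
  induction g generalizing i with
  | nil => simp
  | cons x g ih =>
    have hx : f x = false := hg x List.mem_cons_self
    simp only [List.foldl_cons, pvStepB, hx, Bool.false_eq_true, if_false]
    rw [ih (fun el hel => hg el (List.mem_cons_of_mem _ hel))]
    simp; ring

-- main invariant: A's run-wise fold projects to B's flat fold over the flattened runs
theorem pvRuns_fold (f : String → Bool) (G : List (Bool × List String))
    (hG : ∀ p ∈ G, ∀ el ∈ p.2, f el = p.1) :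
    ∀ (out : List (String × Int)) (par : List String) (i : Int),
      (((G.foldl (fun (st : List (String × Int) × List String × Int) grp =>
          if grp.1 then
            (st.1 ++ grp.2.map (fun el => (el, st.2.2)), st.2.1, st.2.2)
          else
            (st.1, st.2.1 ++ grp.2, st.2.2 + (grp.2.length : Int))) (out, par, i)).1),
       ((G.foldl (fun (st : List (String × Int) × List String × Int) grp =>
          if grp.1 then
            (st.1 ++ grp.2.map (fun el => (el, st.2.2)), st.2.1, st.2.2)
          else
            (st.1, st.2.1 ++ grp.2, st.2.2 + (grp.2.length : Int))) (out, par, i)).2.2)) =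
      (G.flatMap Prod.snd).foldl (pvStepB f) (out, i) := by
  induction G with
  | nil => intro out par i; simp
  | cons p G ih =>
    intro out par i
    obtain ⟨b, g⟩ := p
    have hrun : ∀ el ∈ g, f el = b := fun el hel => hG (b, g) List.mem_cons_self el hel
    have hG' : ∀ p ∈ G, ∀ el ∈ p.2, f el = p.1 :=
      fun p hp => hG p (List.mem_cons_of_mem _ hp)
    cases b with
    | true =>
      simp only [List.foldl_cons, List.flatMap_cons, List.foldl_append, if_true]
      rw [pvStepB_true_run f g hrun out i]
      exact ih hG' _ _ _
    | false =>
      simp only [List.foldl_cons, List.flatMap_cons, List.foldl_append, Bool.false_eq_true,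
        if_false]
      rw [pvStepB_false_run f g hrun out i]
      exact ih hG' _ _ _

-- ===== VERDICT (by name: the statement is the Claim_ definition above) =====
theorem target_insert_pos_spec : Claim_equal_target_insert_pos := by
  intro el_dict parent _
  unfold Spec_target_insert_pos target_insert_pos target_insert_pos_alt
  set d := PySem.Dict.ofList el_dict with hd
  have h := pvRuns_fold (fun x => d.getD x false)
    (pvGroupby (fun x => d.getD x false) d.keys) (pvGroupby_sound _ _) [] [] 0
  rw [pvGroupby_flatten] at h
  have h1 := congrArg Prod.fst h
  simpa [pvStepB] using h1
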